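-- pv_equiv track=rewrite | github.com/undagie/tamsa-ner | sota_comparison/scripts/run_gliner_idner2k.py | entity_text_to_token_spans
-- ===== SOURCE A (Python) =====
-- def entity_text_to_token_spans(tokens: list, entity_text: str, text: str) -> tuple:
--     """Find (start_idx, end_idx) token span for entity text (inclusive). Fallback when char spans not used. Returns (-1, -1) if no match."""
--     def norm(s):
--         return " ".join((s or "").split()).strip().lower()
--
--     text_lower = norm(entity_text)
--     if not text_lower:
--         return (-1, -1)
--     n = len(tokens)
--     for start in range(n):
--         for end in range(start, n):
--             span_text = norm(" ".join(tokens[start : end + 1]))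
--             if span_text == text_lower:
--                 return (start, end)
--     for start in range(n):
--         for end in range(start, n):
--             span_text = norm(" ".join(tokens[start : end + 1]))
--             if span_text in text_lower or text_lower in span_text:
--                 return (start, end)
--     return (-1, -1)
-- ===== SOURCE B (Python) =====
-- def entity_text_to_token_spans(tokens: list, entity_text: str, text: str) -> tuple:
--     """Find (start_idx, end_idx) token span for entity text (inclusive). Returns (-1, -1) if no match.
--
--     Normalizes each token once up front and builds each candidate span's
--     normalized text incrementally, instead of re-joining and re-normalizing
--     the whole slice for every (start, end) pair.
--     """
--     def _combine(span, w):
--         # appending one more normalized token to an already-normalized span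
--         if not w:
--             return span
--         return span + " " + w if span else w
--
--     target = " ".join(entity_text.split()).lower()
--     if not target:
--         return (-1, -1)
--     words = [" ".join(t.split()).lower() for t in tokens]
--     n = len(tokens)
--     for start in range(n):
--         span = ""
--         for end in range(start, n):
--             span = _combine(span, words[end])
--             if span == target:
--                 return (start, end)
--     for start in range(n):
--         span = ""
--         for end in range(start, n):
--             span = _combine(span, words[end])
--             if span in target or target in span:
--                 return (start, end)
--     return (-1, -1)
-- ===== Notes on version B (the rewrite author's own statement) =====
-- stated objective: faster
-- what changed: B normalizes every token once up front and extends each candidate span's normalized text incrementally while scanning end, instead of re-joining and re-normalizing the whole token slice for every (start,end) pair.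
import Mathlib
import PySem

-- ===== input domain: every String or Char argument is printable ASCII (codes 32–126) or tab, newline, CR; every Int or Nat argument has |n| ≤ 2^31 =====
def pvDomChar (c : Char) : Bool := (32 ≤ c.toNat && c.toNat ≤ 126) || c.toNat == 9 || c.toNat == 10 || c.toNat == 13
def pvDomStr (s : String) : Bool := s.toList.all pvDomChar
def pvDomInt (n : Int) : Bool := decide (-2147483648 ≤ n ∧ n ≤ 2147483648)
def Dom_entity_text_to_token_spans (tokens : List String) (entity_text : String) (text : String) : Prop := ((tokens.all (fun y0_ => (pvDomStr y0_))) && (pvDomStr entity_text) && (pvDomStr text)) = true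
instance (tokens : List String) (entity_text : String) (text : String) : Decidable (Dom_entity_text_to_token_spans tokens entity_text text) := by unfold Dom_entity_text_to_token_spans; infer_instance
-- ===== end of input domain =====

-- B normalizes each token once and extends each candidate span incrementally instead of
-- re-joining and re-normalizing the whole slice per (start, end) pair; objective: faster.

-- ===== PORT A =====
-- norm(s) = " ".join((s or "").split()).strip().lower()   ((s or "") = s for a str argument)
def pvNorm (s : String) : String :=
  PySem.Str.lower (PySem.Str.strip (PySem.Str.join " " (PySem.Str.split₀ s)))

def entity_text_to_token_spans (tokens : List String) (entity_text : String) (text : String) : List Int :=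
  let text_lower := pvNorm entity_text
  if text_lower = "" then [-1, -1]
  else
    let n : Int := (tokens.length : Int)
    match (PySem.List.pyRange 0 n 1).findSome? (fun start =>
        (PySem.List.pyRange start n 1).findSome? (fun e =>
          let span_text := pvNorm (PySem.Str.join " " (PySem.List.slice tokens (some start) (some (e + 1))))
          if span_text = text_lower then some (start, e) else none)) with
    | some (s, e) => [s, e]
    | none =>
      match (PySem.List.pyRange 0 n 1).findSome? (fun start =>
          (PySem.List.pyRange start n 1).findSome? (fun e =>
            let span_text := pvNorm (PySem.Str.join " " (PySem.List.slice tokens (some start) (some (e + 1))))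
            if PySem.Str.isIn span_text text_lower || PySem.Str.isIn text_lower span_text then some (start, e) else none)) with
      | some (s, e) => [s, e]
      | none => [-1, -1]

-- ===== PORT B =====
def pvBNorm (t : String) : String :=
  PySem.Str.lower (PySem.Str.join " " (PySem.Str.split₀ t))

def pvCombine (span w : String) : String :=
  if w = "" then span else if span = "" then w else span ++ " " ++ w

-- the inner 'for end in range(start, n)' loop carrying the incremental span
def pvBInner (words : List String) (pred : String → Bool) : List Int → String → Option Int
  | [], _ => none
  | e :: rest, span =>
    let span' := pvCombine span (PySem.List.pyGetD words e "")
    if pred span' then some e else pvBInner words pred rest span'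

def entity_text_to_token_spans_alt (tokens : List String) (entity_text : String) (text : String) : List Int :=
  let target := PySem.Str.lower (PySem.Str.join " " (PySem.Str.split₀ entity_text))
  if target = "" then [-1, -1]
  else
    let words := tokens.map pvBNorm
    let n : Int := (tokens.length : Int)
    match (PySem.List.pyRange 0 n 1).findSome? (fun start =>
        (pvBInner words (fun sp => sp = target) (PySem.List.pyRange start n 1) "").map (fun e => (start, e))) with
    | some (s, e) => [s, e]
    | none =>
      match (PySem.List.pyRange 0 n 1).findSome? (fun start =>
          (pvBInner words (fun sp => PySem.Str.isIn sp target || PySem.Str.isIn target sp) (PySem.List.pyRange start n 1) "").map (fun e => (start, e))) with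
      | some (s, e) => [s, e]
      | none => [-1, -1]

-- ===== PRECONDITION & SPEC =====
def Spec_entity_text_to_token_spans (tokens : List String) (entity_text : String) (text : String) (out : List Int) : Prop := out = entity_text_to_token_spans_alt tokens entity_text text
instance (tokens : List String) (entity_text : String) (text : String) (out : List Int) : Decidable (Spec_entity_text_to_token_spans tokens entity_text text out) := by unfold Spec_entity_text_to_token_spans; infer_instance

-- ===== CLAIM (what is proved, stated in full; the proofs are below) =====
def Claim_equal_entity_text_to_token_spans : Prop := ∀ (tokens : List String) (entity_text : String) (text : String), Dom_entity_text_to_token_spans tokens entity_text text → Spec_entity_text_to_token_spans tokens entity_text text (entity_text_to_token_spans tokens entity_text text)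

-- ===== LEMMAS AND PROOFS =====

-- list-level mirror of pvCombine
def pvCombineC (a b : List Char) : List Char :=
  if b = [] then a else if a = [] then b else a ++ ' ' :: b

lemma pvCombine_toList (a b : String) :
    (pvCombine a b).toList = pvCombineC a.toList b.toList := by
  unfold pvCombine pvCombineC
  by_cases hb : b = "" <;> by_cases ha : a = "" <;> simp [ha, hb, String.toList_append]

lemma pvGo_acc (s : List Char) : ∀ (cur : List Char) (acc : List (List Char)),
    PySem.Chars.split₀.go s cur acc = acc.reverse ++ PySem.Chars.split₀.go s cur [] := by
  induction s with
  | nil => intro cur acc; simp [PySem.Chars.split₀.go]; split <;> simp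
  | cons c rest ih =>
    intro cur acc
    simp only [PySem.Chars.split₀.go]
    split
    · split
      · rw [ih [] acc]
      · rw [ih [] (cur.reverse :: acc), ih [] [cur.reverse]]; simp
    · rw [ih (c :: cur) acc]

lemma pvGo_space (a : List Char) : ∀ (b cur : List Char) (acc : List (List Char)),
    PySem.Chars.split₀.go (a ++ ' ' :: b) cur acc
      = PySem.Chars.split₀.go b [] (PySem.Chars.split₀.go a cur acc).reverse := by
  induction a with
  | nil =>
    intro b cur acc
    simp only [List.nil_append, PySem.Chars.split₀.go]
    have : PySem.Chars.isspace ' ' = true := by decide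
    rw [this]
    simp only [if_true]
    split <;> simp
  | cons c rest ih =>
    intro b cur acc
    simp only [List.cons_append, PySem.Chars.split₀.go]
    split
    · split <;> rw [ih]
    · rw [ih]

lemma pvSplit₀_append_space (a b : List Char) :
    PySem.Chars.split₀ (a ++ ' ' :: b) = PySem.Chars.split₀ a ++ PySem.Chars.split₀ b := by
  unfold PySem.Chars.split₀
  rw [pvGo_space, pvGo_acc]
  simp

lemma pvSplit₀_join : ∀ ts : List (List Char),
    PySem.Chars.split₀ (PySem.Chars.join [' '] ts) = ts.flatMap PySem.Chars.split₀ := by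
  intro ts
  induction ts with
  | nil => simp [PySem.Chars.join_nil, PySem.Chars.split₀, PySem.Chars.split₀.go]
  | cons t rest ih =>
    cases rest with
    | nil => simp [PySem.Chars.join_singleton]
    | cons q r =>
      rw [PySem.Chars.join_cons_cons]
      have : t ++ [' '] ++ PySem.Chars.join [' '] (q :: r) = t ++ ' ' :: PySem.Chars.join [' '] (q :: r) := by simp
      rw [this, pvSplit₀_append_space, ih]
      simp

lemma pvSplit₀_good (s : List Char) :
    ∀ w ∈ PySem.Chars.split₀ s, w ≠ [] ∧ ∀ c ∈ w, PySem.Chars.isspace c = false := by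
  have main : ∀ (s cur : List Char) (acc : List (List Char)),
      (∀ c ∈ cur, PySem.Chars.isspace c = false) →
      (∀ w ∈ acc, w ≠ [] ∧ ∀ c ∈ w, PySem.Chars.isspace c = false) →
      ∀ w ∈ PySem.Chars.split₀.go s cur acc, w ≠ [] ∧ ∀ c ∈ w, PySem.Chars.isspace c = false := by
    intro s
    induction s with
    | nil =>
      intro cur acc hcur hacc
      simp only [PySem.Chars.split₀.go]
      split
      · simpa using hacc
      · rename_i hne
        intro w hw
        rw [List.mem_reverse] at hw
        rcases List.mem_cons.mp hw with hw | hw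
        · subst hw
          constructor
          · simp; intro h; subst h; simp at hne
          · intro c hc; exact hcur c (by simpa using hc)
        · exact hacc w hw
    | cons c rest ih =>
      intro cur acc hcur hacc
      simp only [PySem.Chars.split₀.go]
      split
      · rename_i hsp
        split
        · exact ih [] acc (by simp) hacc
        · rename_i hne
          refine ih [] (cur.reverse :: acc) (by simp) ?_
          intro w hw
          rcases List.mem_cons.mp hw with hw | hw
          · subst hw
            refine ⟨by simpa using fun h => hne (by simp [h]), ?_⟩
            intro d hd; exact hcur d (by simpa using hd)
          · exact hacc w hw
      · rename_i hsp
        refine ih (c :: cur) acc ?_ hacc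
        intro d hd
        rcases List.mem_cons.mp hd with h | h
        · subst h; simpa using hsp
        · exact hcur d h
  intro w hw
  exact main s [] [] (by simp) (by simp) w hw

lemma pvJoin_ne_nil (ws : List (List Char)) (h : ∀ w ∈ ws, w ≠ []) (hw : ws ≠ []) :
    PySem.Chars.join [' '] ws ≠ [] := by
  cases ws with
  | nil => simp at hw
  | cons w rest =>
    cases rest with
    | nil => simpa [PySem.Chars.join_singleton] using h w (by simp)
    | cons q r =>
      rw [PySem.Chars.join_cons_cons]
      have := h w (by simp)
      simp [this]

lemma pvLower_append (x y : List Char) :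
    PySem.Chars.lower (x ++ y) = PySem.Chars.lower x ++ PySem.Chars.lower y := by
  simp [PySem.Chars.lower]

lemma pvJoin_append (A B : List (List Char)) (hA : ∀ w ∈ A, w ≠ []) (hB : ∀ w ∈ B, w ≠ []) :
    PySem.Chars.join [' '] (A ++ B) = pvCombineC (PySem.Chars.join [' '] A) (PySem.Chars.join [' '] B) := by
  induction A with
  | nil =>
    simp only [List.nil_append, PySem.Chars.join_nil, pvCombineC]
    split_ifs with h
    · exact h
    · rfl
  | cons a A' ih =>
    cases B with
    | nil => simp [PySem.Chars.join_nil, pvCombineC]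
    | cons b B' =>
      have hBne : PySem.Chars.join [' '] (b :: B') ≠ [] := pvJoin_ne_nil _ hB (by simp)
      cases A' with
      | nil =>
        have haA : PySem.Chars.join [' '] [a] = a := PySem.Chars.join_singleton _ _
        have hane : a ≠ [] := hA a (by simp)
        rw [List.singleton_append, PySem.Chars.join_cons_cons]
        simp [pvCombineC, haA, hBne, hane]
      | cons a2 A'' =>
        have hA' : ∀ w ∈ a2 :: A'', w ≠ [] := fun w hw => hA w (by simp [hw])
        have hAne : PySem.Chars.join [' '] (a :: a2 :: A'') ≠ [] := pvJoin_ne_nil _ hA (by simp)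
        have hA'ne : PySem.Chars.join [' '] (a2 :: A'') ≠ [] := pvJoin_ne_nil _ hA' (by simp)
        have hA'Bne : PySem.Chars.join [' '] ((a2 :: A'') ++ b :: B') ≠ [] := by
          apply pvJoin_ne_nil
          · intro w hw; rcases List.mem_append.mp hw with h | h; exact hA' w h; exact hB w h
          · simp
        have ih' := ih hA'
        simp only [List.cons_append] at ih' hA'Bne ⊢
        rw [PySem.Chars.join_cons_cons [' '] a a2, PySem.Chars.join_cons_cons [' '] a a2, ih']
        have hAne2 : ¬ (a ++ [' '] ++ PySem.Chars.join [' '] (a2 :: A'') = []) := by simp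
        simp only [pvCombineC, if_neg hBne, if_neg hA'ne, if_neg hAne2]
        simp [List.append_assoc]

lemma pvLower_join (ws : List (List Char)) :
    PySem.Chars.lower (PySem.Chars.join [' '] ws) = PySem.Chars.join [' '] (ws.map PySem.Chars.lower) := by
  induction ws with
  | nil => simp [PySem.Chars.join_nil, PySem.Chars.lower]
  | cons w rest ih =>
    cases rest with
    | nil => simp [PySem.Chars.join_singleton]
    | cons q r =>
      simp only [List.map_cons] at ih ⊢
      rw [PySem.Chars.join_cons_cons, PySem.Chars.join_cons_cons]
      rw [pvLower_append, pvLower_append, ih]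
      have hsp : PySem.Chars.lower [' '] = [' '] := by decide
      rw [hsp]

lemma pvJoin_rev_head (ws : List (List Char))
    (h : ∀ w ∈ ws, w ≠ [] ∧ ∀ c ∈ w, PySem.Chars.isspace c = false) (hne : ws ≠ []) :
    ∃ c t, (PySem.Chars.join [' '] ws).reverse = c :: t ∧ PySem.Chars.isspace c = false := by
  induction ws with
  | nil => simp at hne
  | cons w rest ih =>
    cases rest with
    | nil =>
      rw [PySem.Chars.join_singleton]
      obtain ⟨hw, hsp⟩ := h w (by simp)
      rcases hr : w.reverse with _ | ⟨c, t⟩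
      · simp_all
      · exact ⟨c, t, rfl, hsp c (by rw [← List.mem_reverse, hr]; simp)⟩
    | cons q r =>
      obtain ⟨c, t, hct, hcsp⟩ := ih (fun w hw => h w (by simp [hw])) (by simp)
      rw [PySem.Chars.join_cons_cons]
      refine ⟨c, t ++ [' '] ++ w.reverse, ?_, hcsp⟩
      rw [List.reverse_append, List.reverse_append, hct]
      simp

lemma pvStrip_join (ws : List (List Char))
    (h : ∀ w ∈ ws, w ≠ [] ∧ ∀ c ∈ w, PySem.Chars.isspace c = false) :
    PySem.Chars.strip (PySem.Chars.join [' '] ws) = PySem.Chars.join [' '] ws := by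
  cases hws : ws with
  | nil => simp [PySem.Chars.join_nil]; decide
  | cons w rest =>
    subst hws
    obtain ⟨hw, hwsp⟩ := h w (by simp)
    -- head char is non-space
    have hhead : ∃ c t, PySem.Chars.join [' '] (w :: rest) = c :: t ∧ PySem.Chars.isspace c = false := by
      rcases hwc : w with _ | ⟨c, w'⟩
      · simp_all
      · cases rest with
        | nil => exact ⟨c, w', by rw [PySem.Chars.join_singleton], hwsp c (by simp [hwc])⟩
        | cons q r =>
          refine ⟨c, w' ++ [' '] ++ PySem.Chars.join [' '] (q :: r), ?_, hwsp c (by simp [hwc])⟩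
          rw [PySem.Chars.join_cons_cons]; simp
    obtain ⟨c, t, hct, hcsp⟩ := hhead
    obtain ⟨d, u, hdu, hdsp⟩ := pvJoin_rev_head (w :: rest) h (by simp)
    unfold PySem.Chars.strip PySem.Chars.lstrip PySem.Chars.rstrip
    rw [hct, List.dropWhile_cons]
    simp only [hcsp, Bool.false_eq_true, if_false]
    rw [← hct, hdu, List.dropWhile_cons]
    simp only [hdsp, Bool.false_eq_true, if_false]
    rw [← hdu, List.reverse_reverse]

lemma pvFold_combine (tss : List (List (List Char))) (h : ∀ ws ∈ tss, ∀ w ∈ ws, w ≠ []) :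
    (tss.map (PySem.Chars.join [' '])).foldl pvCombineC [] = PySem.Chars.join [' '] tss.flatten := by
  suffices H : ∀ V, (∀ w ∈ V, w ≠ []) →
      (tss.map (PySem.Chars.join [' '])).foldl pvCombineC (PySem.Chars.join [' '] V)
        = PySem.Chars.join [' '] (V ++ tss.flatten) by
    simpa [PySem.Chars.join_nil] using H [] (by simp)
  induction tss with
  | nil => intro V hV; simp
  | cons ws tss' ih =>
    intro V hV
    have hws : ∀ w ∈ ws, w ≠ [] := h ws (by simp)
    have h' : ∀ ws' ∈ tss', ∀ w ∈ ws', w ≠ [] := fun a ha => h a (by simp [ha])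
    have hVws : ∀ w ∈ V ++ ws, w ≠ [] := by
      intro w hw; rcases List.mem_append.mp hw with h1 | h1; exact hV w h1; exact hws w h1
    simp only [List.map_cons, List.foldl_cons]
    rw [← pvJoin_append V ws hV hws]
    have := (ih h') (V ++ ws) hVws
    rw [this]
    simp

lemma pvFoldCombine_toList (l : List String) : ∀ acc : String,
    (l.foldl pvCombine acc).toList = (l.map String.toList).foldl pvCombineC acc.toList := by
  induction l with
  | nil => intro acc; simp
  | cons x xs ih => intro acc; simp only [List.foldl_cons, List.map_cons, ih, pvCombine_toList]

lemma pvMainC (cts : List (List Char)) :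
    PySem.Chars.lower (PySem.Chars.strip (PySem.Chars.join [' ']
        (PySem.Chars.split₀ (PySem.Chars.join [' '] cts))))
      = (cts.map (fun t => PySem.Chars.lower (PySem.Chars.join [' '] (PySem.Chars.split₀ t)))).foldl pvCombineC [] := by
  have hgood : ∀ w ∈ cts.flatMap PySem.Chars.split₀, w ≠ [] ∧ ∀ c ∈ w, PySem.Chars.isspace c = false := by
    intro w hw
    obtain ⟨t, _, hw⟩ := List.mem_flatMap.mp hw
    exact pvSplit₀_good t w hw
  rw [pvSplit₀_join, pvStrip_join _ hgood, pvLower_join]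
  have rhs1 : ∀ t : List Char,
      PySem.Chars.lower (PySem.Chars.join [' '] (PySem.Chars.split₀ t))
        = PySem.Chars.join [' '] ((PySem.Chars.split₀ t).map PySem.Chars.lower) := fun t => pvLower_join _
  rw [List.map_congr_left (fun t (_ : t ∈ cts) => rhs1 t)]
  have : cts.map (fun t => PySem.Chars.join [' '] ((PySem.Chars.split₀ t).map PySem.Chars.lower))
      = (cts.map (fun t => (PySem.Chars.split₀ t).map PySem.Chars.lower)).map (PySem.Chars.join [' ']) := by
    simp [List.map_map, Function.comp]
  rw [this, pvFold_combine]
  · congr 1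
    simp [List.flatten_eq_flatMap, List.map_flatMap, List.flatMap_map]
  · intro ws hws w hw
    simp only [List.mem_map] at hws
    obtain ⟨t, _, rfl⟩ := hws
    obtain ⟨u, hu, rfl⟩ := List.mem_map.mp hw
    have := (pvSplit₀_good t u hu).1
    simp [PySem.Chars.lower, this]

lemma pvMain (ts : List String) :
    pvNorm (PySem.Str.join " " ts) = (ts.map pvBNorm).foldl pvCombine "" := by
  apply String.toList_inj.mp
  rw [pvFoldCombine_toList]
  unfold pvNorm
  simp only [PySem.Str.toList_lower, PySem.Str.toList_strip, PySem.Str.toList_join,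
    PySem.Str.split₀_map_toList, List.map_map]
  have hsep : (" " : String).toList = [' '] := by decide
  rw [hsep]
  have hbn : (ts.map (String.toList ∘ pvBNorm))
      = (ts.map String.toList).map (fun t => PySem.Chars.lower (PySem.Chars.join [' '] (PySem.Chars.split₀ t))) := by
    simp only [List.map_map]
    apply List.map_congr_left
    intro t _
    simp [Function.comp, pvBNorm, PySem.Str.toList_lower, PySem.Str.toList_join,
      PySem.Str.split₀_map_toList, hsep]
  have := pvMainC (ts.map String.toList)
  simp only [hbn]
  simpa using this

lemma pvNorm_eq_bnorm (s : String) : pvNorm s = pvBNorm s := by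
  apply String.toList_inj.mp
  unfold pvNorm pvBNorm
  have hsep : (" " : String).toList = [' '] := by decide
  simp only [PySem.Str.toList_lower, PySem.Str.toList_strip, PySem.Str.toList_join,
    PySem.Str.split₀_map_toList, hsep]
  rw [pvStrip_join _ (pvSplit₀_good s.toList)]

-- the token slice tokens[s:e+1], as B scans it
def pvSpanW (words : List String) (a b : Nat) : List String := (words.drop a).take (b - a)

lemma pvSpanW_snoc (words : List String) (s m : Nat) (hs : s ≤ m) (hm : m < words.length) :
    pvSpanW words s (m + 1) = pvSpanW words s m ++ [words[m]] := by
  unfold pvSpanW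
  have h1 : m + 1 - s = (m - s) + 1 := by omega
  rw [h1, List.take_add_one]
  congr 1
  have : (words.drop s)[m - s]? = some words[m] := by
    rw [List.getElem?_drop]
    have : s + (m - s) = m := by omega
    rw [this, List.getElem?_eq_getElem hm]
  simp [this]

lemma pvFindSome?_map {α β : Type} (l : List α) (p : α → Bool) (f : α → β) :
    (l.findSome? (fun e => if p e then some e else none)).map f
      = l.findSome? (fun e => if p e then some (f e) else none) := by
  induction l with
  | nil => simp
  | cons x xs ih =>
    simp only [List.findSome?_cons]
    by_cases h : p x <;> simp [h, ih]

lemma pvFindSome?_congr {α β : Type} (l : List α) (f g : α → Option β)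
    (h : ∀ a ∈ l, f a = g a) : l.findSome? f = l.findSome? g := by
  induction l with
  | nil => simp
  | cons x xs ih =>
    simp only [List.findSome?_cons, h x (by simp)]
    cases g x with
    | some b => rfl
    | none => exact ih (fun a ha => h a (by simp [ha]))

lemma pvInnerEq (words : List String) (pred : String → Bool) (s : Nat) :
    ∀ (k m : Nat), s ≤ m → m + k = words.length →
      pvBInner words pred (PySem.List.pyRange (m : Int) (words.length : Int) 1) ((pvSpanW words s m).foldl pvCombine "")
        = (PySem.List.pyRange (m : Int) (words.length : Int) 1).findSome?
            (fun e => if pred ((pvSpanW words s (e.toNat + 1)).foldl pvCombine "") then some e else none) := by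
  intro k
  induction k with
  | zero =>
    intro m hs hm
    rw [PySem.List.pyRange_one_eq_nil (by omega)]
    rfl
  | succ k ih =>
    intro m hs hm
    have hmlt : (m : Int) < (words.length : Int) := by omega
    rw [PySem.List.pyRange_one_cons hmlt]
    have hmw : m < words.length := by omega
    have hget : PySem.List.pyGetD words (m : Int) "" = words[m] := by
      rw [PySem.List.pyGetD_natCast, List.getD_eq_getElem?_getD, List.getElem?_eq_getElem hmw]
      rfl
    have hspan : pvCombine ((pvSpanW words s m).foldl pvCombine "") words[m]
        = (pvSpanW words s (m + 1)).foldl pvCombine "" := by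
      rw [pvSpanW_snoc words s m hs hmw, List.foldl_append]
      rfl
    simp only [pvBInner, hget, hspan, List.findSome?_cons, Int.toNat_natCast]
    by_cases hp : pred ((pvSpanW words s (m + 1)).foldl pvCombine "") <;> simp only [hp, if_true]
    have hcast : ((m : Int) + 1) = ((m + 1 : Nat) : Int) := by push_cast; ring
    rw [hcast]
    exact ih (m + 1) (by omega) (by omega)

lemma pvSpan_eq (tokens : List String) (a b : Nat) :
    pvNorm (PySem.Str.join " " (PySem.List.slice tokens (some (a : Int)) (some (b : Int))))
      = (pvSpanW (tokens.map pvBNorm) a b).foldl pvCombine "" := by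
  rw [PySem.List.slice_natCast, pvMain]
  unfold pvSpanW
  rw [List.map_take, List.map_drop]

lemma pvPassEq (tokens : List String) (pred : String → Bool) :
    (PySem.List.pyRange 0 (tokens.length : Int) 1).findSome? (fun start =>
        (PySem.List.pyRange start (tokens.length : Int) 1).findSome? (fun e =>
          if pred (pvNorm (PySem.Str.join " " (PySem.List.slice tokens (some start) (some (e + 1))))) = true
          then some (start, e) else none))
      = (PySem.List.pyRange 0 (tokens.length : Int) 1).findSome? (fun start =>
          (pvBInner (tokens.map pvBNorm) pred (PySem.List.pyRange start (tokens.length : Int) 1) "").map (fun e => (start, e))) := by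
  apply pvFindSome?_congr
  intro s hs
  rw [PySem.List.mem_pyRange_one] at hs
  obtain ⟨hs0, hsn⟩ := hs
  have hsa : s = (s.toNat : Int) := by omega
  have hlw : ((tokens.map pvBNorm).length : Int) = (tokens.length : Int) := by simp
  have hw0 : ((pvSpanW (tokens.map pvBNorm) s.toNat s.toNat).foldl pvCombine "") = "" := by
    unfold pvSpanW; simp
  have hinner := pvInnerEq (tokens.map pvBNorm) pred s.toNat (tokens.length - s.toNat) s.toNat
    (le_refl _) (by simp; omega)
  rw [hw0] at hinner
  rw [hsa, ← hlw, hinner, pvFindSome?_map]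
  rw [hlw, ← hsa]
  apply pvFindSome?_congr
  intro e he
  rw [PySem.List.mem_pyRange_one] at he
  obtain ⟨he1, he2⟩ := he
  have heb : e + 1 = ((e.toNat + 1 : Nat) : Int) := by omega
  rw [hsa, heb, pvSpan_eq tokens s.toNat (e.toNat + 1), Int.toNat_natCast]

-- ===== VERDICT (by name: the statement is the Claim_ definition above) =====
theorem entity_text_to_token_spans_spec : Claim_equal_entity_text_to_token_spans := by
  intro tokens ent text _
  show entity_text_to_token_spans tokens ent text = entity_text_to_token_spans_alt tokens ent text
  unfold entity_text_to_token_spans entity_text_to_token_spans_alt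
  have htl : pvNorm ent = PySem.Str.lower (PySem.Str.join " " (PySem.Str.split₀ ent)) :=
    pvNorm_eq_bnorm ent
  rw [htl]
  set tl := PySem.Str.lower (PySem.Str.join " " (PySem.Str.split₀ ent)) with htldef
  by_cases h0 : tl = ""
  · simp [h0]
  · simp only [h0, if_false]
    have h1 := pvPassEq tokens (fun sp => decide (sp = tl))
    simp only [decide_eq_true_eq] at h1
    have h2 := pvPassEq tokens (fun sp => PySem.Str.isIn sp tl || PySem.Str.isIn tl sp)
    rw [h1, h2]
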